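-- pv_equiv track=rewrite | github.com/ccnmtl/dmt | dmt/main/models.py | overdue_days_to_string
-- ===== SOURCE A (Python) =====
-- def overdue_days_to_string(overdue):
--     levels = [
--         (-7, "ok"),
--         (-1, "upcoming"),
--         (1, "due"),
--         (7, "overdue"),
--     ]
--     for days, level in levels:
--         if overdue < days:
--             return level
--     return "late"
-- ===== SOURCE B (Python) =====
-- import bisect
--
-- def overdue_days_to_string(overdue):
--     breakpoints = [-7, -1, 1, 7]
--     labels = ["ok", "upcoming", "due", "overdue", "late"]
--     return labels[bisect.bisect_right(breakpoints, overdue)]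
-- ===== Notes on version B (the rewrite author's own statement) =====
-- stated objective: idiomatic
-- what changed: Replaces the early-return linear scan over (threshold, label) pairs with parallel breakpoint/label tables and a bisect_right binary-search lookup.
import Mathlib
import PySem

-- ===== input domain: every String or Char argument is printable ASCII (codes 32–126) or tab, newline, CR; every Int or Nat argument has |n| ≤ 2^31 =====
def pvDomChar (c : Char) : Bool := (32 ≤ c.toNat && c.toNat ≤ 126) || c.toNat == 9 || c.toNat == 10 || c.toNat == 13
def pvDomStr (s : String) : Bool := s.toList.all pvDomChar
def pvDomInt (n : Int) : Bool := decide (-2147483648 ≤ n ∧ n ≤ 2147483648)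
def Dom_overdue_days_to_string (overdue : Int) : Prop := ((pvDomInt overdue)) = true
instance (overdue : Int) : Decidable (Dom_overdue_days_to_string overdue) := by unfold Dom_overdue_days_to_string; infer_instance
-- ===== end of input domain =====

-- B replaces A's early-return linear scan over (threshold, label) pairs with parallel
-- breakpoint/label tables and a bisect_right lookup (idiomatic table lookup; same result).

-- ===== PORT A =====
-- the 'for days, level in levels: if overdue < days: return level' loop, step for step
def pvALoop (overdue : Int) : List (Int × String) → String
  | [] => "late"
  | (days, level) :: rest => if overdue < days then level else pvALoop overdue rest

def overdue_days_to_string (overdue : Int) : String :=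
  pvALoop overdue [(-7, "ok"), (-1, "upcoming"), (1, "due"), (7, "overdue")]

-- ===== PORT B =====
def overdue_days_to_string_alt (overdue : Int) : String :=
  let breakpoints : List Int := [-7, -1, 1, 7]
  let labels : List String := ["ok", "upcoming", "due", "overdue", "late"]
  labels.getD (PySem.List.bisectRight breakpoints overdue) ""

-- ===== PRECONDITION & SPEC =====
def Spec_overdue_days_to_string (overdue : Int) (out : String) : Prop := out = overdue_days_to_string_alt overdue
instance (overdue : Int) (out : String) : Decidable (Spec_overdue_days_to_string overdue out) := by unfold Spec_overdue_days_to_string; infer_instance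

-- ===== CLAIM (what is proved, stated in full; the proofs are below) =====
def Claim_equal_overdue_days_to_string : Prop := ∀ (overdue : Int), Dom_overdue_days_to_string overdue → Spec_overdue_days_to_string overdue (overdue_days_to_string overdue)

-- ===== LEMMAS AND PROOFS =====

-- ===== VERDICT (by name: the statement is the Claim_ definition above) =====
theorem overdue_days_to_string_spec : Claim_equal_overdue_days_to_string := by
  intro o _
  unfold Spec_overdue_days_to_string overdue_days_to_string overdue_days_to_string_alt
  rcases lt_or_ge o (-7) with h1 | h1
  · simp [pvALoop, PySem.List.bisectRight, PySem.List.bisectRightLoop, h1,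
      show o < -1 by omega, show o < 1 by omega]
  rcases lt_or_ge o (-1) with h2 | h2
  · simp [pvALoop, PySem.List.bisectRight, PySem.List.bisectRightLoop, h2, not_lt.mpr h1,
      show o < 1 by omega]
  rcases lt_or_ge o 1 with h3 | h3
  · simp [pvALoop, PySem.List.bisectRight, PySem.List.bisectRightLoop, h3, not_lt.mpr h1, not_lt.mpr h2]
  rcases lt_or_ge o 7 with h4 | h4
  · simp [pvALoop, PySem.List.bisectRight, PySem.List.bisectRightLoop, h4, not_lt.mpr h1, not_lt.mpr h2, not_lt.mpr h3]
  · simp [pvALoop, PySem.List.bisectRight, PySem.List.bisectRightLoop, not_lt.mpr h1, not_lt.mpr h2, not_lt.mpr h3, not_lt.mpr h4]
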